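-- pv_equiv track=rewrite | github.com/Cho-Woojin/Urban-Refurbishing-Project_DATA-SET | scripts/geocode_location_priority.py | reorder_prefer_lot
-- ===== SOURCE A (Python) =====
-- from typing import Dict, Tuple, Optional, List, Iterable
--
-- def reorder_prefer_lot(candidates: List[Tuple[str,str]]) -> List[Tuple[str,str]]:
--     """지번 기반(combo_*, dong_bunji, dong_main 등) 후보를 loc_raw/loc_simplified 보다 앞으로 재배치.
--     이미 순서가 앞선 경우는 그대로.
--     """
--     if not candidates:
--         return candidates
--     lot_priority_tags_prefix = (
--         'combo_parsed_full','combo_full','combo_main_only','combo_full_no_san','combo_main_no_san',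
--         'loc_dong_bunji_full','loc_dong_bunji','loc_dong_bunji_full_no_san','loc_dong_main','loc_dong_main_no_san'
--     )
--     lot_part=[]; others=[]
--     seen=set()
--     for q,t in candidates:
--         bucket = lot_part if t.startswith(lot_priority_tags_prefix) else others
--         if (q,t) not in seen:
--             bucket.append((q,t)); seen.add((q,t))
--     # loc_raw 가 lot 후보보다 이미 더 세밀하다면 (실제로는 아닐 가능성 크지만) 그대로 두어도 부작용 없음
--     return lot_part + [x for x in others if x not in lot_part]
-- ===== SOURCE B (Python) =====
-- from typing import List, Tuple
--
-- def reorder_prefer_lot(candidates: List[Tuple[str,str]]) -> List[Tuple[str,str]]: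
--     if not candidates:
--         return candidates
--     lot_priority_tags_prefix = (
--         'combo_parsed_full','combo_full','combo_main_only','combo_full_no_san','combo_main_no_san',
--         'loc_dong_bunji_full','loc_dong_bunji','loc_dong_bunji_full_no_san','loc_dong_main','loc_dong_main_no_san'
--     )
--     uniq = list(dict.fromkeys(candidates))
--     return sorted(uniq, key=lambda qt: not qt[1].startswith(lot_priority_tags_prefix))
-- ===== Notes on version B (the rewrite author's own statement) =====
-- stated objective: idiomatic
-- what changed: A's manual three-accumulator loop (two buckets plus a seen-set, then a redundant membership filter) is replaced by an ordered dedup via dict.fromkeys followed by a single stable sort on the boolean key 'not lot-tagged', which realises the stable partition.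
import Mathlib
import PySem

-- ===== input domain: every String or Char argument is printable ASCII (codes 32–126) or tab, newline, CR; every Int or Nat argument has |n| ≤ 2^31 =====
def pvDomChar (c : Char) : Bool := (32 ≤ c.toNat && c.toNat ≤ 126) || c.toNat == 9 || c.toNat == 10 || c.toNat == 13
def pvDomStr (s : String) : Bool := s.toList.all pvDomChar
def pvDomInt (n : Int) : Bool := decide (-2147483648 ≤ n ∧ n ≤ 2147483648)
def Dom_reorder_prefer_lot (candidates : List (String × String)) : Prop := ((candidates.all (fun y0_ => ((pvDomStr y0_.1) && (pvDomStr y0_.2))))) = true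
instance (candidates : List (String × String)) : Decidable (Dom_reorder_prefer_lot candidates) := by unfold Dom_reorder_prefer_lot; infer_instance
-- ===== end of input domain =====

-- B replaces A's manual three-accumulator partition loop by an ordered dedup (dict.fromkeys)
-- followed by a stable sort on the boolean key "not lot-tagged" (objective: idiomatic).

-- shared constant: the lot-priority tag prefixes, and the t.startswith(tuple) test
def lotTags : List String :=
  ["combo_parsed_full","combo_full","combo_main_only","combo_full_no_san","combo_main_no_san",
   "loc_dong_bunji_full","loc_dong_bunji","loc_dong_bunji_full_no_san","loc_dong_main","loc_dong_main_no_san"]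

def isLot (t : String) : Bool := lotTags.any (fun p => PySem.Str.startswith t p)

-- ===== PORT A =====
-- A's loop: per element pick the bucket by the tag, append if unseen (seen is a Python set)
def stepA (st : List (String × String) × List (String × String) × PySem.Set (String × String))
    (qt : String × String) :
    List (String × String) × List (String × String) × PySem.Set (String × String) :=
  if PySem.Set.contains st.2.2 qt then st
  else if isLot qt.2 then (st.1 ++ [qt], st.2.1, PySem.Set.add st.2.2 qt)
  else (st.1, st.2.1 ++ [qt], PySem.Set.add st.2.2 qt)

def reorder_prefer_lot (candidates : List (String × String)) : List (String × String) :=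
  if candidates = [] then candidates
  else
    let st := candidates.foldl stepA ([], [], PySem.Set.empty)
    st.1 ++ st.2.1.filter (fun x => !(st.1.contains x))

-- ===== PORT B =====
def reorder_prefer_lot_alt (candidates : List (String × String)) : List (String × String) :=
  if candidates = [] then candidates
  else PySem.List.sorted (PySem.List.dedup candidates) (fun qt => !(isLot qt.2)) false

-- ===== PRECONDITION & SPEC =====
def Spec_reorder_prefer_lot (candidates : List (String × String)) (out : List (String × String)) : Prop := out = reorder_prefer_lot_alt candidates
instance (candidates : List (String × String)) (out : List (String × String)) : Decidable (Spec_reorder_prefer_lot candidates out) := by unfold Spec_reorder_prefer_lot; infer_instance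

-- ===== CLAIM (what is proved, stated in full; the proofs are below) =====
def Claim_equal_reorder_prefer_lot : Prop := ∀ (candidates : List (String × String)), Dom_reorder_prefer_lot candidates → Spec_reorder_prefer_lot candidates (reorder_prefer_lot candidates)

-- ===== LEMMAS AND PROOFS =====

-- A's fold keeps exactly the two filters of the running set of seen elements
theorem foldA_inv (cs : List (String × String)) (S : PySem.Set (String × String)) :
    cs.foldl stepA (S.filter (fun x => isLot x.2), S.filter (fun x => !(isLot x.2)), S) =
      ((cs.foldl PySem.Set.add S).filter (fun x => isLot x.2),
       (cs.foldl PySem.Set.add S).filter (fun x => !(isLot x.2)),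
       cs.foldl PySem.Set.add S) := by
  induction cs generalizing S with
  | nil => rfl
  | cons x cs ih =>
    simp only [List.foldl_cons]
    by_cases hc : PySem.Set.contains S x = true
    all_goals have hm := hc
    all_goals simp only [PySem.Set.contains, List.contains_iff_mem] at hm
    · have hadd : PySem.Set.add S x = S := by simp [PySem.Set.add, PySem.Set.contains] at hc ⊢; simp [hc]
      rw [show stepA (S.filter (fun x => isLot x.2), S.filter (fun x => !(isLot x.2)), S) x
            = (S.filter (fun x => isLot x.2), S.filter (fun x => !(isLot x.2)), S) by
            simp [stepA, hm]]
      rw [hadd]; exact ih S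
    · have hadd : PySem.Set.add S x = S ++ [x] := by
        simp [PySem.Set.add, hm]
      by_cases hl : isLot x.2 = true
      · rw [show stepA (S.filter (fun x => isLot x.2), S.filter (fun x => !(isLot x.2)), S) x
              = ((S ++ [x]).filter (fun x => isLot x.2), (S ++ [x]).filter (fun x => !(isLot x.2)), PySem.Set.add S x) by
              simp [stepA, hl, hm, List.filter_append]]
        rw [← hadd]; exact ih _
      · rw [show stepA (S.filter (fun x => isLot x.2), S.filter (fun x => !(isLot x.2)), S) x
              = ((S ++ [x]).filter (fun x => isLot x.2), (S ++ [x]).filter (fun x => !(isLot x.2)), PySem.Set.add S x) by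
              simp [stepA, hl, hm, List.filter_append]]
        rw [← hadd]; exact ih _

-- a stable insertion sort on a Bool key is the partition: false-key elements first, in order
theorem insertBy_cons {α : Type} (bef : α → α → Bool) (x y : α) (ys : List α) :
    PySem.List.insertBy bef x (y :: ys) = if bef x y then x :: y :: ys else y :: PySem.List.insertBy bef x ys := rfl

theorem insertBy_false_key {α : Type} (k : α → Bool) (x : α) (F T : List α)
    (hF : ∀ y ∈ F, k y = false) (hT : ∀ y ∈ T, k y = true) (hx : k x = false) :
    PySem.List.insertBy (fun a b => decide (k a < k b)) x (F ++ T) = (F ++ [x]) ++ T := by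
  induction F with
  | nil =>
    cases T with
    | nil => rfl
    | cons t ts =>
      have ht := hT t (by simp)
      simp [insertBy_cons, hx, ht]
  | cons f fs ih =>
    have hf := hF f (by simp)
    rw [List.cons_append, insertBy_cons, if_neg (by simp [hf]),
        ih (fun y hy => hF y (by simp [hy]))]
    simp

theorem insertBy_true_key {α : Type} (k : α → Bool) (x : α) (l : List α) (hx : k x = true) :
    PySem.List.insertBy (fun a b => decide (k a < k b)) x l = l ++ [x] := by
  induction l with
  | nil => rfl
  | cons y ys ih =>
    rw [insertBy_cons, if_neg (by simp [hx]), ih]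
    rfl

theorem sorted_bool_key_partition {α : Type} (k : α → Bool) (xs : List α) :
    PySem.List.sorted xs k false = xs.filter (fun x => !(k x)) ++ xs.filter k := by
  rw [PySem.List.sorted_eq_foldl_insertBy]
  suffices h : ∀ (F T : List α), (∀ y ∈ F, k y = false) → (∀ y ∈ T, k y = true) →
      xs.foldl (fun acc x => PySem.List.insertBy (fun a b => decide (k a < k b)) x acc) (F ++ T)
        = (F ++ xs.filter (fun x => !(k x))) ++ (T ++ xs.filter k) by
    simpa using h [] [] (by simp) (by simp)
  induction xs with
  | nil => intro F T _ _; simp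
  | cons x xs ih =>
    intro F T hF hT
    simp only [List.foldl_cons, List.filter_cons]
    by_cases hx : k x = true
    · rw [insertBy_true_key k x (F ++ T) hx, List.append_assoc F T [x],
          ih F (T ++ [x]) hF (by intro y hy; rcases List.mem_append.1 hy with h | h
                                 exacts [hT y h, by simp at h; simp [h, hx]])]
      simp [hx]
    · rw [insertBy_false_key k x F T hF hT (by simpa using hx),
          ih (F ++ [x]) T (by intro y hy; rcases List.mem_append.1 hy with h | h
                              exacts [hF y h, by simp at h; simp [h]; simpa using hx]) hT]
      simp [hx]

-- ===== VERDICT (by name: the statement is the Claim_ definition above) =====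
theorem reorder_prefer_lot_spec : Claim_equal_reorder_prefer_lot := by
  intro candidates _
  unfold Spec_reorder_prefer_lot reorder_prefer_lot reorder_prefer_lot_alt
  by_cases hnil : candidates = []
  · simp [hnil]
  · simp only [if_neg hnil]
    have hfold := foldA_inv candidates PySem.Set.empty
    simp only [PySem.Set.empty] at hfold ⊢
    simp only [List.filter_nil] at hfold
    rw [hfold]
    rw [show (List.foldl PySem.Set.add ([] : PySem.Set (String × String)) candidates)
          = PySem.List.dedup candidates by
        simp [PySem.List.dedup, PySem.Set.ofList_eq_foldl]]
    rw [sorted_bool_key_partition (fun qt => !(isLot qt.2)) (PySem.List.dedup candidates)]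
    simp only [Bool.not_not]
    congr 1
    rw [List.filter_eq_self]
    intro a ha
    have hnl : isLot a.2 = false := by simpa using (List.mem_filter.1 ha).2
    simp only [Bool.not_eq_eq_eq_not, Bool.not_true]
    rw [← Bool.not_eq_true]
    intro hcont
    have : a ∈ List.filter (fun x => isLot x.2) (PySem.List.dedup candidates) := by
      simpa using hcont
    have := (List.mem_filter.1 this).2
    simp [hnl] at this
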